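-- pv_equiv track=rewrite | github.com/VadimSmirno/tasks_python_basic | Module20/03_function/main.py | new_tuple
-- ===== SOURCE A (Python) =====
-- def new_tuple (cortege, element):
--
--     if cortege.count(element) == 1:
--         return tuple(list(cortege)[list(cortege).index(element):])
--     elif cortege.count(element) >= 2:
--         lst_index = [i_key for i_key, i_value in enumerate (list(cortege)) if i_value == element]
--         return tuple(list(cortege)[lst_index[0]+1:lst_index[1]+1])
--     else:
--         return ()
-- ===== SOURCE B (Python) =====
-- def new_tuple(cortege, element):
--     # One-pass state machine: before the first occurrence we just scan;
--     # after it we collect elements, returning immediately when a second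
--     # occurrence appears; if none appears, the first occurrence plus the
--     # collected tail is the answer.
--     first = None
--     acc = []
--     for v in cortege:
--         if first is not None:
--             acc.append(v)
--             if v == element:
--                 return tuple(acc)
--         elif v == element:
--             first = v
--     return () if first is None else (first,) + tuple(acc)
-- ===== Notes on version B (the rewrite author's own statement) =====
-- stated objective: simpler
-- what changed: B is a single left-to-right state-machine pass that collects the output incrementally (scan to the first match, then append elements, returning immediately at a second match), replacing A's count()/index()/enumerate scans and slicing entirely.
import Mathlib
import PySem

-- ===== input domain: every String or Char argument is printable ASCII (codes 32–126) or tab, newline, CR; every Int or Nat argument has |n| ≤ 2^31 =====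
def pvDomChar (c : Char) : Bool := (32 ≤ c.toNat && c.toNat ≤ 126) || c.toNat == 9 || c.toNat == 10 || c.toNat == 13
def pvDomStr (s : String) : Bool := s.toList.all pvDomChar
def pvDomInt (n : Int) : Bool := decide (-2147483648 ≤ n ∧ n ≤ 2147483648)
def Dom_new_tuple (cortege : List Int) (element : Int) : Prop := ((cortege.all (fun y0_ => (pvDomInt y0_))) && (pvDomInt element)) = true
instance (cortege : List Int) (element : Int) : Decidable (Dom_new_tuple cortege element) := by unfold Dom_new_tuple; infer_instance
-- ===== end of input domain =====

-- B replaces A's count/index/slice passes by a single left-to-right state-machine pass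
-- that collects the output incrementally (objective: simpler).

-- ===== PORT A =====
def new_tuple (cortege : List Int) (element : Int) : List Int :=
  if PySem.List.count cortege element == 1 then
    -- list(cortege)[list(cortege).index(element):]; .index cannot raise here since count == 1
    match PySem.List.index? cortege element with
    | some i => PySem.List.slice cortege (some (i : Int)) none
    | none => []   -- unreachable
  else if 2 ≤ PySem.List.count cortege element then
    let lst_index : List Int :=
      ((PySem.List.enumerate cortege 0).filter (fun p => p.2 == element)).map (·.1)
    -- lst_index[0], lst_index[1]; cannot raise since count >= 2
    match PySem.List.pyGet? lst_index 0, PySem.List.pyGet? lst_index 1 with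
    | some a, some b => PySem.List.slice cortege (some (a + 1)) (some (b + 1))
    | _, _ => []   -- unreachable
  else []

-- ===== PORT B =====
-- the 'first is not None' phase of Source B's loop: collect, early return on a second match
def nt_after (xs : List Int) (e : Int) (acc : List Int) : Bool × List Int :=
  match xs with
  | [] => (false, acc)
  | v :: rest => if v == e then (true, acc ++ [v]) else nt_after rest e (acc ++ [v])

-- the 'first is None' phase: scan until the first match
def nt_first (xs : List Int) (e : Int) : List Int :=
  match xs with
  | [] => []
  | v :: rest =>
    if v == e then
      match nt_after rest e [] with
      | (true, r) => r
      | (false, acc) => v :: acc   -- (first,) + tuple(acc)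
    else nt_first rest e

def new_tuple_alt (cortege : List Int) (element : Int) : List Int :=
  nt_first cortege element

-- ===== PRECONDITION & SPEC =====
def Spec_new_tuple (cortege : List Int) (element : Int) (out : List Int) : Prop := out = new_tuple_alt cortege element
instance (cortege : List Int) (element : Int) (out : List Int) : Decidable (Spec_new_tuple cortege element out) := by unfold Spec_new_tuple; infer_instance

-- ===== CLAIM =====
def Claim_equal_new_tuple : Prop := ∀ (cortege : List Int) (element : Int), Dom_new_tuple cortege element → Spec_new_tuple cortege element (new_tuple cortege element)

-- ===== LEMMAS AND PROOFS =====

/-- The occurrence-position list A's second branch builds. -/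
def pvIdxs (c : List Int) (e : Int) (s : Int) : List Int :=
  ((PySem.List.enumerate c s).filter (fun p => p.2 == e)).map (·.1)

theorem pvIdxs_cons (x : Int) (xs : List Int) (e s : Int) :
    pvIdxs (x :: xs) e s = if x == e then s :: pvIdxs xs e (s + 1) else pvIdxs xs e (s + 1) := by
  simp only [pvIdxs, PySem.List.enumerate_cons, List.filter_cons]
  by_cases h : x == e <;> simp [h]

theorem pvIdxs_not_mem (l : List Int) (e : Int) (s : Int) (h : e ∉ l) :
    pvIdxs l e s = [] := by
  induction l generalizing s with
  | nil => rfl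
  | cons x xs ih =>
    have hx : x ≠ e := fun hh => h (hh ▸ List.mem_cons_self ..)
    rw [pvIdxs_cons, if_neg (by simpa using hx)]
    exact ih (s + 1) (fun hm => h (List.mem_cons_of_mem _ hm))

theorem pvIdxs_append (l r : List Int) (e : Int) (s : Int) :
    pvIdxs (l ++ r) e s = pvIdxs l e s ++ pvIdxs r e (s + l.length) := by
  induction l generalizing s with
  | nil => simp [pvIdxs]
  | cons x xs ih =>
    rw [List.cons_append, pvIdxs_cons, pvIdxs_cons, ih]
    by_cases h : x == e <;> simp [h] <;> ring_nf

theorem nt_after_not_mem (xs : List Int) (e : Int) (acc : List Int) (h : e ∉ xs) :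
    nt_after xs e acc = (false, acc ++ xs) := by
  induction xs generalizing acc with
  | nil => simp [nt_after]
  | cons v rest ih =>
    have hv : v ≠ e := fun hh => h (hh ▸ List.mem_cons_self ..)
    rw [nt_after, if_neg (by simpa using hv), ih _ (fun hm => h (List.mem_cons_of_mem _ hm))]
    simp

theorem nt_after_mem (pre suf : List Int) (e : Int) (acc : List Int) (hpre : e ∉ pre) :
    nt_after (pre ++ e :: suf) e acc = (true, acc ++ pre ++ [e]) := by
  induction pre generalizing acc with
  | nil => simp [nt_after]
  | cons p ps ih =>
    have hp : p ≠ e := fun hh => hpre (hh ▸ List.mem_cons_self ..)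
    rw [List.cons_append, nt_after, if_neg (by simpa using hp),
      ih _ (fun hm => hpre (List.mem_cons_of_mem _ hm))]
    simp

theorem nt_first_skip (pre rest : List Int) (e : Int) (h : e ∉ pre) :
    nt_first (pre ++ rest) e = nt_first rest e := by
  induction pre with
  | nil => rfl
  | cons p ps ih =>
    have hp : p ≠ e := fun hh => h (hh ▸ List.mem_cons_self ..)
    rw [List.cons_append, nt_first, if_neg (by simpa using hp)]
    exact ih (fun hm => h (List.mem_cons_of_mem _ hm))

theorem nt_first_not_mem (xs : List Int) (e : Int) (h : e ∉ xs) : nt_first xs e = [] := by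
  have := nt_first_skip xs [] e h
  simpa [nt_first] using this

-- ===== VERDICT =====
theorem new_tuple_spec : Claim_equal_new_tuple := by
  intro c e _
  unfold Spec_new_tuple new_tuple new_tuple_alt
  rcases hidx : PySem.List.index? c e with _ | k
  · -- no occurrence
    rw [PySem.List.index?_eq_idxOf?] at hidx
    have hmem : e ∉ c := by simp_all
    have hcount : c.count e = 0 := List.count_eq_zero.mpr hmem
    rw [nt_first_not_mem c e hmem]
    simp [PySem.List.count_eq, hcount]
  · obtain ⟨pre, suf, hc, hklen, hpre⟩ := (PySem.List.index?_eq_some_iff _ _ _).mp hidx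
    subst hc
    have hcpre : pre.count e = 0 := List.count_eq_zero.mpr hpre
    rw [nt_first_skip pre _ e hpre]
    rcases hm : PySem.List.index? suf e with _ | m
    · -- exactly one occurrence
      rw [PySem.List.index?_eq_idxOf?] at hm
      have hsuf : e ∉ suf := by simp_all
      have hcnt : (pre ++ e :: suf).count e = 1 := by
        simp [List.count_append, hcpre, List.count_eq_zero.mpr hsuf]
      have hB : nt_first (e :: suf) e = e :: suf := by
        rw [nt_first, if_pos (by simp), nt_after_not_mem suf e [] hsuf]
        simp
      rw [hB, PySem.List.count_eq, hcnt]
      show PySem.List.slice (pre ++ e :: suf) (some (k : Int)) none = e :: suf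
      rw [PySem.List.slice_from_natCast, ← hklen, List.drop_left]
    · -- at least two occurrences
      obtain ⟨pre2, suf2, hs, hmlen, hpre2⟩ := (PySem.List.index?_eq_some_iff _ _ _).mp hm
      subst hs
      have hcnt : 2 ≤ (pre ++ e :: (pre2 ++ e :: suf2)).count e := by
        simp [List.count_append, hcpre, List.count_eq_zero.mpr hpre2]
      have hB : nt_first (e :: (pre2 ++ e :: suf2)) e = pre2 ++ [e] := by
        rw [nt_first, if_pos (by simp), nt_after_mem pre2 suf2 e [] hpre2]
        simp
      rw [hB, PySem.List.count_eq, if_neg (by simp; omega), if_pos (by omega)]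
      -- the index table
      have hidxs : pvIdxs (pre ++ e :: (pre2 ++ e :: suf2)) e 0 =
          (k : Int) :: ((k : Int) + 1 + (m : Int)) :: pvIdxs suf2 e ((k : Int) + 1 + (m : Int) + 1) := by
        rw [pvIdxs_append, pvIdxs_not_mem pre e 0 hpre, pvIdxs_cons, if_pos (by simp),
          pvIdxs_append, pvIdxs_not_mem pre2 e _ hpre2, pvIdxs_cons, if_pos (by simp)]
        simp [hklen, hmlen]
      show (match PySem.List.pyGet? (pvIdxs _ e 0) 0, PySem.List.pyGet? (pvIdxs _ e 0) 1 with
        | some a, some b => PySem.List.slice _ (some (a + 1)) (some (b + 1))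
        | _, _ => []) = pre2 ++ [e]
      rw [hidxs]
      have hg0 : PySem.List.pyGet? ((k : Int) :: ((k : Int) + 1 + (m : Int)) :: pvIdxs suf2 e ((k : Int) + 1 + (m : Int) + 1)) 0 = some (k : Int) := by
        simp
      have hg1 : PySem.List.pyGet? ((k : Int) :: ((k : Int) + 1 + (m : Int)) :: pvIdxs suf2 e ((k : Int) + 1 + (m : Int) + 1)) 1 = some ((k : Int) + 1 + (m : Int)) := by
        simp
      rw [hg0, hg1]
      show PySem.List.slice (pre ++ e :: (pre2 ++ e :: suf2)) (some ((k : Int) + 1)) (some ((k : Int) + 1 + (m : Int) + 1)) = pre2 ++ [e]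
      have hcast : ((k : Int) + 1 + (m : Int)) + 1 = ((k + 1 : Nat) : Int) + ((m + 1 : Nat) : Int) := by push_cast; ring
      have hcast0 : (k : Int) + 1 = ((k + 1 : Nat) : Int) := by push_cast; ring
      rw [hcast, hcast0, PySem.List.slice_natCast_add]
      -- ((pre ++ e :: (pre2 ++ e :: suf2)).drop (k+1)).take (m+1) = pre2 ++ [e]
      have hdrop : (pre ++ e :: (pre2 ++ e :: suf2)).drop (k + 1) = pre2 ++ e :: suf2 := by
        rw [← hklen]
        have : pre.length + 1 = (pre ++ [e]).length := by simp
        rw [this, show pre ++ e :: (pre2 ++ e :: suf2) = (pre ++ [e]) ++ (pre2 ++ e :: suf2) by simp,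
          List.drop_left]
      rw [hdrop, ← hmlen, show pre2.length + 1 = (pre2 ++ [e]).length by simp,
        show pre2 ++ e :: suf2 = (pre2 ++ [e]) ++ suf2 by simp, List.take_left]
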